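-- pv_equiv track=rewrite | github.com/rcg86/Fevfire_Reporting | report_data.py | _title_to_html
-- ===== SOURCE A (Python) =====
-- def _title_to_html(label):
--     """Convert a rendered title_format string to an HTML fragment.
--
--     Supported escape sequences (as written in single-quoted YAML strings,
--     where they arrive here as literal two-character sequences):
--
--     ``\\n``  – row break.  Each ``\\n`` starts a new line / table row.
--     ``\\t``  – tab stop (em-space).  Kept for simple alignment needs.
--     ``\\|``  – **column separator**.  When a row contains one or more ``\\|``
--              the whole title is rendered as a ``<table>`` so every ``\\|``-
--              separated cell gets an equal share of the available width,
--              giving *symmetrical* alignment regardless of label length.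
--
--     Rows without ``\\|`` are rendered as plain ``<tr>`` full-width cells
--     (they still support ``\\t`` em-spaces if desired).
--     """
--     rows = label.split('\\n')
--     has_table = any('\\|' in row for row in rows)
--
--     if not has_table:
--         # Simple mode: no column separators — just replace escape sequences.
--         return label.replace('\\n', '<br>').replace('\\t', '&emsp;')
--
--     # Table mode: build an HTML table so columns align perfectly.
--     # Determine the maximum number of cells in any row to set colspan correctly.
--     max_cols = max((row.count('\\|') + 1) if '\\|' in row else 1 for row in rows)
--     table_style = 'border-collapse: collapse; line-height: 1.6; width: 100%;'
--     cell_style  = 'padding: 0 16px 0 0; white-space: nowrap; vertical-align: top;'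
--     full_style  = f'padding: 0; white-space: nowrap; vertical-align: top;'
--
--     html_rows = []
--     for row in rows:
--         if '\\|' in row:
--             cells = row.split('\\|')
--             tds = ''.join(
--                 f'<td style="{cell_style}">{c.strip().replace(chr(92) + "t", "&emsp;")}</td>'
--                 for c in cells
--             )
--             html_rows.append(f'<tr>{tds}</tr>')
--         else:
--             plain = row.replace('\\t', '&emsp;')
--             html_rows.append(
--                 f'<tr><td colspan="{max_cols}" style="{full_style}">{plain}</td></tr>'
--             )
--
--     inner = ''.join(html_rows)
--     return f'<table style="{table_style}">{inner}</table>'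
-- ===== SOURCE B (Python) =====
-- def _title_to_html(label):
--     # Single forward character scan builds the row/cell structure once;
--     # table detection, colspan and rendering all read that structure.
--     rows, cells, cur = [], [], []
--     i, n = 0, len(label)
--     while i < n:
--         pair = label[i:i + 2]
--         if pair == '\\n':
--             cells.append(''.join(cur))
--             rows.append(cells)
--             cells, cur = [], []
--             i += 2
--         elif pair == '\\|':
--             cells.append(''.join(cur))
--             cur = []
--             i += 2
--         else:
--             cur.append(label[i])
--             i += 1
--     cells.append(''.join(cur))
--     rows.append(cells)
--
--     if not any(len(r) > 1 for r in rows):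
--         return label.replace('\\n', '<br>').replace('\\t', '&emsp;')
--
--     max_cols = max(len(r) for r in rows)
--     table_style = 'border-collapse: collapse; line-height: 1.6; width: 100%;'
--     cell_style = 'padding: 0 16px 0 0; white-space: nowrap; vertical-align: top;'
--     full_style = 'padding: 0; white-space: nowrap; vertical-align: top;'
--     parts = ['<table style="%s">' % table_style]
--     for r in rows:
--         if len(r) > 1:
--             parts.append('<tr>')
--             for c in r:
--                 parts.append('<td style="%s">%s</td>'
--                              % (cell_style, c.strip().replace('\\t', '&emsp;')))
--             parts.append('</tr>')
--         else:
--             parts.append('<tr><td colspan="%d" style="%s">%s</td></tr>'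
--                          % (max_cols, full_style, r[0].replace('\\t', '&emsp;')))
--     parts.append('</table>')
--     return ''.join(parts)
-- ===== Notes on version B (the rewrite author's own statement) =====
-- stated objective: alternative
-- what changed: B replaces A's split/membership/count string pipeline with a single forward character scan that recognises the \n and \| escapes itself and builds the row/cell structure in one pass, from which table detection, colspan and rendering are driven.
import Mathlib
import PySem

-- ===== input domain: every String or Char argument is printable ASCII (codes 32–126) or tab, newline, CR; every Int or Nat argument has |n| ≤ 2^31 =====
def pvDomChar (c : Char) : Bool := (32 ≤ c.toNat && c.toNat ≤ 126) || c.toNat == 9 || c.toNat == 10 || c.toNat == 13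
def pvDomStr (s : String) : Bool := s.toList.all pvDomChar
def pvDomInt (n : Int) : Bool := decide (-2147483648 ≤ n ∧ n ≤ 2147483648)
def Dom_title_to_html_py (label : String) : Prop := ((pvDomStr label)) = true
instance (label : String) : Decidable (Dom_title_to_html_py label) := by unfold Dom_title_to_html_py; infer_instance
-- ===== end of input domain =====

-- B replaces A's split/'in'/count string pipeline with one forward character scan that
-- recognises the escape sequences itself and builds the row/cell structure in a single pass
-- (objective: alternative decomposition, same asymptotic cost).


-- s.split(sep) for a nonempty separator (exact: PySem.Chars.splitOn is the sep ≠ '' form)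
def pySplit (s sep : String) : List String :=
  (PySem.Chars.splitOn s.toList sep.toList).map String.ofList

-- ===== PORT A =====
def title_to_html_py (label : String) : String :=
  let rows := pySplit label "\\n"
  let has_table := rows.any (fun row => PySem.Str.isIn "\\|" row)
  if has_table = false then
    PySem.Str.replace (PySem.Str.replace label "\\n" "<br>") "\\t" "&emsp;"
  else
    -- max(...) over a generator: nonempty here since split always returns ≥ 1 row, so `.getD 1` never fires
    let max_cols : Int :=
      ((PySem.List.max? (rows.map (fun row =>
          if PySem.Str.isIn "\\|" row then (PySem.Str.count row "\\|" : Int) + 1 else 1)) id).getD 1)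
    let table_style := "border-collapse: collapse; line-height: 1.6; width: 100%;"
    let cell_style := "padding: 0 16px 0 0; white-space: nowrap; vertical-align: top;"
    let full_style := "padding: 0; white-space: nowrap; vertical-align: top;"
    let html_rows := rows.foldl (fun acc row =>
      if PySem.Str.isIn "\\|" row then
        let cells := pySplit row "\\|"
        let tds := PySem.Str.join "" (cells.map (fun c =>
          "<td style=\"" ++ cell_style ++ "\">" ++
            PySem.Str.replace (PySem.Str.strip c) "\\t" "&emsp;" ++ "</td>"))
        acc ++ ["<tr>" ++ tds ++ "</tr>"]
      else
        let plain := PySem.Str.replace row "\\t" "&emsp;"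
        acc ++ ["<tr><td colspan=\"" ++ PySem.Int.toStr max_cols ++ "\" style=\"" ++
          full_style ++ "\">" ++ plain ++ "</td></tr>"]) ([] : List String)
    let inner := PySem.Str.join "" html_rows
    "<table style=\"" ++ table_style ++ "\">" ++ inner ++ "</table>"

-- ===== PORT B =====
-- the while loop of Source B: recursion on the remaining characters, with Source B's
-- (rows, cells, cur) accumulators; the two-character lookahead is the patterns
def scanGo : List Char → List (List String) → List String → List Char → List (List String)
  | [], rows, cells, cur => rows ++ [cells ++ [String.ofList cur]]
  | '\\' :: 'n' :: rest, rows, cells, cur => scanGo rest (rows ++ [cells ++ [String.ofList cur]]) [] []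
  | '\\' :: '|' :: rest, rows, cells, cur => scanGo rest rows (cells ++ [String.ofList cur]) []
  | c :: rest, rows, cells, cur => scanGo rest rows cells (cur ++ [c])

def title_to_html_py_alt (label : String) : String :=
  let rows := scanGo label.toList [] [] []
  if (rows.any fun r => 1 < r.length) = false then
    PySem.Str.replace (PySem.Str.replace label "\\n" "<br>") "\\t" "&emsp;"
  else
    let max_cols : Int := ((PySem.List.max? (rows.map fun r => (r.length : Int)) id).getD 1)
    let table_style := "border-collapse: collapse; line-height: 1.6; width: 100%;"
    let cell_style := "padding: 0 16px 0 0; white-space: nowrap; vertical-align: top;"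
    let full_style := "padding: 0; white-space: nowrap; vertical-align: top;"
    let parts := rows.foldl (fun acc r =>
      if 1 < r.length then
        (r.foldl (fun a c =>
          a ++ ["<td style=\"" ++ cell_style ++ "\">" ++
                 PySem.Str.replace (PySem.Str.strip c) "\\t" "&emsp;" ++ "</td>"])
          (acc ++ ["<tr>"])) ++ ["</tr>"]
      else
        -- r[0]: r is never empty (the scan emits at least one cell per row); getD "" is unreachable
        acc ++ ["<tr><td colspan=\"" ++ PySem.Int.toStr max_cols ++ "\" style=\"" ++ full_style ++
          "\">" ++ PySem.Str.replace ((PySem.List.pyGet? r 0).getD "") "\\t" "&emsp;" ++ "</td></tr>"])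
      ["<table style=\"" ++ table_style ++ "\">"]
    PySem.Str.join "" (parts ++ ["</table>"])

-- ===== PRECONDITION & SPEC =====
def Spec_title_to_html_py (label : String) (out : String) : Prop := out = title_to_html_py_alt label
instance (label : String) (out : String) : Decidable (Spec_title_to_html_py label out) := by unfold Spec_title_to_html_py; infer_instance

-- ===== CLAIM (what is proved, stated in full; the proofs are below) =====
def Claim_equal_title_to_html_py : Prop := ∀ (label : String), Dom_title_to_html_py label → Spec_title_to_html_py label (title_to_html_py label)

-- ===== LEMMAS AND PROOFS =====

-- ---- generic recursive characterisation of PySem.Chars.splitOn ----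
theorem mh_id {α : Type} (l : List α) : List.modifyHead (fun x : α => x) l = l := by
  cases l <;> simp

theorem sgo_spec (sep : List Char) (fuel : Nat) (l cur : List Char) (acc : List (List Char)) :
    PySem.Chars.splitOn.go sep fuel l cur acc
      = acc.reverse ++ (PySem.Chars.splitOn.go sep fuel l [] []).modifyHead (cur.reverse ++ ·) := by
  induction fuel generalizing l cur acc with
  | zero => simp [PySem.Chars.splitOn.go]
  | succ f ih =>
    cases l with
    | nil => simp [PySem.Chars.splitOn.go]
    | cons c rest =>
      rw [PySem.Chars.splitOn.go]
      conv_rhs => rw [PySem.Chars.splitOn.go]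
      split_ifs with h
      · rw [ih _ [] (cur.reverse :: acc)]
        conv_rhs => rw [ih]
        simp
      · rw [ih rest (c :: cur) acc]
        conv_rhs => rw [ih]
        simp
        rfl

theorem sgo_fuel (sep : List Char) (hs : sep ≠ []) (fuel : Nat) (l cur : List Char)
    (acc : List (List Char)) (h : l.length ≤ fuel) :
    PySem.Chars.splitOn.go sep (fuel + 1) l cur acc = PySem.Chars.splitOn.go sep fuel l cur acc := by
  induction fuel generalizing l cur acc with
  | zero =>
    cases l with
    | nil => simp [PySem.Chars.splitOn.go]
    | cons c rest => simp at h
  | succ f ih =>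
    cases l with
    | nil => simp [PySem.Chars.splitOn.go]
    | cons c rest =>
      rw [PySem.Chars.splitOn.go]
      conv_rhs => rw [PySem.Chars.splitOn.go]
      split_ifs with hp
      · apply ih
        have : 1 ≤ sep.length := by cases sep <;> simp_all
        simp at h ⊢
        omega
      · apply ih; simp at h ⊢; omega

theorem sgo_norm (sep : List Char) (hs : sep ≠ []) (fuel : Nat) (l cur : List Char)
    (acc : List (List Char)) (h : l.length ≤ fuel) :
    PySem.Chars.splitOn.go sep fuel l cur acc = PySem.Chars.splitOn.go sep l.length l cur acc := by
  induction fuel generalizing l cur acc with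
  | zero =>
    have : l.length = 0 := by omega
    rw [this]
  | succ f ih =>
    rcases Nat.lt_or_ge l.length (f + 1) with hlt | hge
    · rw [sgo_fuel sep hs f l cur acc (by omega), ih l cur acc (by omega)]
    · have : l.length = f + 1 := by omega
      rw [this]

theorem splitOn_nil' (sep : List Char) : PySem.Chars.splitOn [] sep = [[]] := by
  simp [PySem.Chars.splitOn, PySem.Chars.splitOn.go]

theorem splitOn_pos (sep l : List Char) (hs : sep ≠ []) (h : sep.isPrefixOf l) :
    PySem.Chars.splitOn l sep = [] :: PySem.Chars.splitOn (l.drop sep.length) sep := by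
  cases l with
  | nil =>
    exfalso; apply hs
    simpa using List.isPrefixOf_iff_prefix.mp h
  | cons c rest =>
    rw [PySem.Chars.splitOn]
    rw [show (c :: rest).length + 1 = (rest.length + 1) + 1 from rfl]
    rw [PySem.Chars.splitOn.go]
    rw [if_pos h]
    rw [sgo_spec]
    have hd : (List.drop sep.length (c :: rest)).length ≤ rest.length + 1 := by
      simp only [List.length_drop, List.length_cons]; omega
    rw [sgo_norm sep hs (rest.length + 1) _ [] [] hd]
    conv_rhs => rw [PySem.Chars.splitOn, sgo_fuel sep hs _ _ [] [] le_rfl]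
    simp only [List.length_drop, List.length_cons]
    simp [mh_id]

theorem splitOn_cons_neg (sep : List Char) (c : Char) (rest : List Char)
    (h : ¬ sep.isPrefixOf (c :: rest) = true) :
    PySem.Chars.splitOn (c :: rest) sep = (PySem.Chars.splitOn rest sep).modifyHead (c :: ·) := by
  rw [PySem.Chars.splitOn]
  rw [show (c :: rest).length + 1 = (rest.length + 1) + 1 from rfl]
  rw [PySem.Chars.splitOn.go]
  rw [if_neg h]
  rw [sgo_spec]
  rw [PySem.Chars.splitOn]
  simp

-- ---- length / membership facts about count and splitOn ----
theorem countgo_acc (sub : List Char) (fuel : Nat) (l : List Char) (acc : Nat) :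
    PySem.Chars.count.go sub fuel l acc = acc + PySem.Chars.count.go sub fuel l 0 := by
  induction fuel generalizing l acc with
  | zero => simp [PySem.Chars.count.go]
  | succ f ih =>
    cases l with
    | nil => simp [PySem.Chars.count.go]
    | cons c rest =>
      rw [PySem.Chars.count.go, PySem.Chars.count.go]
      split_ifs with h
      · rw [ih _ (acc+1), ih _ (0+1)]; omega
      · exact ih rest acc

theorem countgo_fuel (sub : List Char) (hs : sub ≠ []) (fuel : Nat) (l : List Char) (acc : Nat)
    (h : l.length ≤ fuel) :
    PySem.Chars.count.go sub (fuel+1) l acc = PySem.Chars.count.go sub fuel l acc := by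
  induction fuel generalizing l acc with
  | zero =>
    cases l with
    | nil => simp [PySem.Chars.count.go]
    | cons c rest => simp at h
  | succ f ih =>
    cases l with
    | nil => simp [PySem.Chars.count.go]
    | cons c rest =>
      rw [PySem.Chars.count.go]
      conv_rhs => rw [PySem.Chars.count.go]
      split_ifs with hp
      · apply ih
        have : 1 ≤ sub.length := by cases sub <;> simp_all
        simp at h ⊢
        omega
      · apply ih; simp at h ⊢; omega

theorem splitgo_len (sub : List Char) (fuel : Nat) (l cur : List Char) (acc : List (List Char)) :
    (PySem.Chars.splitOn.go sub fuel l cur acc).length = acc.length + 1 + PySem.Chars.count.go sub fuel l 0 := by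
  induction fuel generalizing l cur acc with
  | zero => simp [PySem.Chars.splitOn.go, PySem.Chars.count.go]
  | succ f ih =>
    cases l with
    | nil => simp [PySem.Chars.splitOn.go, PySem.Chars.count.go]
    | cons c rest =>
      rw [PySem.Chars.splitOn.go, PySem.Chars.count.go]
      split_ifs with h
      · rw [ih, countgo_acc sub f _ 1]; simp; omega
      · exact ih rest (c :: cur) acc

theorem countgo_pos_iff (sub : List Char) (hs : sub ≠ []) (fuel : Nat) (l : List Char)
    (h : l.length ≤ fuel) :
    0 < PySem.Chars.count.go sub fuel l 0 ↔ sub <:+: l := by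
  induction fuel generalizing l with
  | zero =>
    cases l with
    | nil => simp [PySem.Chars.count.go]; exact hs
    | cons c rest => simp at h
  | succ f ih =>
    cases l with
    | nil => simp [PySem.Chars.count.go]; exact hs
    | cons c rest =>
      rw [PySem.Chars.count.go]
      split_ifs with hp
      · rw [countgo_acc]
        simp
        exact (List.IsPrefix.isInfix (List.isPrefixOf_iff_prefix.mp hp))
      · rw [ih rest (by simp at h ⊢; omega)]
        rw [List.infix_cons_iff]
        constructor
        · exact .inr
        · rintro (hpre | hinf)
          · exact absurd (List.isPrefixOf_iff_prefix.mpr hpre) (by simpa using hp)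
          · exact hinf

theorem len_splitOn (l sub : List Char) (hs : sub ≠ []) :
    (PySem.Chars.splitOn l sub).length = PySem.Chars.count l sub + 1 := by
  rw [PySem.Chars.splitOn, splitgo_len, countgo_fuel sub hs l.length l 0 le_rfl,
      PySem.Chars.count]
  simp [List.isEmpty_iff, hs]
  omega

theorem splitOn_ne_nil (l sub : List Char) (hs : sub ≠ []) :
    PySem.Chars.splitOn l sub ≠ [] := by
  have := len_splitOn l sub hs
  intro hnil
  rw [hnil] at this
  simp at this

theorem isIn_iff_len (l sub : List Char) (hs : sub ≠ []) :
    PySem.Chars.isIn sub l = decide (1 < (PySem.Chars.splitOn l sub).length) := by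
  rw [len_splitOn l sub hs]
  by_cases h : sub <:+: l
  · have h1 := (PySem.Chars.isIn_iff_infix sub l).mpr h
    have h2 := (countgo_pos_iff sub hs l.length l le_rfl).mpr h
    rw [h1, PySem.Chars.count]
    simp [List.isEmpty_iff, hs]
    omega
  · have h1 : PySem.Chars.isIn sub l = false := by
      cases hb : PySem.Chars.isIn sub l
      · rfl
      · exact absurd ((PySem.Chars.isIn_iff_infix sub l).mp hb) h
    have h2 : PySem.Chars.count l sub = 0 := by
      rw [PySem.Chars.count]; simp [List.isEmpty_iff, hs]
      by_contra hc
      exact h ((countgo_pos_iff sub hs l.length l le_rfl).mp (by omega))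
    rw [h1, h2]
    simp

theorem splitOn_of_not_infix (l sub : List Char) (_hs : sub ≠ []) (h : ¬ sub <:+: l) :
    PySem.Chars.splitOn l sub = [l] := by
  induction l with
  | nil => exact splitOn_nil' sub
  | cons c rest ih =>
    have hp : ¬ sub.isPrefixOf (c :: rest) = true := fun hpp =>
      h (List.IsPrefix.isInfix (List.isPrefixOf_iff_prefix.mp hpp))
    rw [splitOn_cons_neg sub c rest hp, ih (fun hi => h (List.infix_cons_iff.mpr (.inr hi)))]
    rfl

-- Str-level keys: '\|' in row  <->  len(row.split('\|')) > 1, per-row column count = len(cells)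
theorem key_isIn (row : String) :
    PySem.Str.isIn "\\|" row = decide (1 < (pySplit row "\\|").length) := by
  rw [PySem.Str.isIn, pySplit]
  simpa using isIn_iff_len row.toList "\\|".toList (by decide)

theorem key_cols (row : String) :
    (if PySem.Str.isIn "\\|" row then (PySem.Str.count row "\\|" : Int) + 1 else 1)
      = ((pySplit row "\\|").length : Int) := by
  have hlen : (pySplit row "\\|").length = PySem.Str.count row "\\|" + 1 := by
    rw [pySplit, PySem.Str.count]
    simpa using len_splitOn row.toList "\\|".toList (by decide)
  by_cases h : PySem.Str.isIn "\\|" row = true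
  · rw [if_pos h, hlen]; push_cast; ring
  · rw [if_neg h, hlen]
    have : ¬ (1 < (pySplit row "\\|").length) := by
      rw [key_isIn] at h; simpa using h
    omega

theorem key_single (row : String) (h : ¬ PySem.Str.isIn "\\|" row = true) :
    pySplit row "\\|" = [row] := by
  have hinf : ¬ ("\\|".toList <:+: row.toList) := by
    intro hi
    exact h (by rw [PySem.Str.isIn]; simpa using (PySem.Chars.isIn_iff_infix _ _).mpr hi)
  rw [pySplit, splitOn_of_not_infix row.toList "\\|".toList (by decide) hinf]
  simp

-- ---- the scan of B computes the nested split of A ----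
def glue (cur : List Char) : List (List Char) → List String
  | [] => [String.ofList cur]
  | c1 :: cs => String.ofList (cur ++ c1) :: cs.map String.ofList
def comb (rows : List (List String)) (cells : List String) (cur : List Char) :
    List (List (List Char)) → List (List String)
  | [] => rows
  | r1 :: rs => rows ++ ((cells ++ glue cur r1) :: rs.map (List.map String.ofList))
def nestedC (l : List Char) : List (List (List Char)) :=
  (PySem.Chars.splitOn l ['\\', 'n']).map (fun r => PySem.Chars.splitOn r ['\\', '|'])

theorem scan_spec (rem : List Char) (rows : List (List String)) (cells : List String)
    (cur : List Char) : scanGo rem rows cells cur = comb rows cells cur (nestedC rem) := by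
  fun_induction scanGo rem rows cells cur with
  | case1 rows cells cur =>
    simp [nestedC, splitOn_nil', comb, glue]
  | case2 rest rows cells cur ih =>
    have hpre : (['\\','n'] : List Char).isPrefixOf ('\\' :: 'n' :: rest) = true := by
      simp [List.isPrefixOf]
    obtain ⟨h1d, t1, hs1⟩ := List.exists_cons_of_ne_nil (splitOn_ne_nil rest ['\\','n'] (by decide))
    obtain ⟨g1, gs, hs2⟩ := List.exists_cons_of_ne_nil (splitOn_ne_nil h1d ['\\','|'] (by decide))
    rw [ih]
    simp [nestedC, splitOn_pos _ _ (by decide) hpre, splitOn_nil', hs1, hs2, comb, glue]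
  | case3 rest rows cells cur ih =>
    have hn1 : ¬ (['\\','n'] : List Char).isPrefixOf ('\\' :: '|' :: rest) = true := by
      simp [List.isPrefixOf]
    have hn2 : ¬ (['\\','n'] : List Char).isPrefixOf ('|' :: rest) = true := by
      simp [List.isPrefixOf]
    obtain ⟨h1d, t1, hs1⟩ := List.exists_cons_of_ne_nil (splitOn_ne_nil rest ['\\','n'] (by decide))
    obtain ⟨g1, gs, hs2⟩ := List.exists_cons_of_ne_nil (splitOn_ne_nil h1d ['\\','|'] (by decide))
    have hbar : (['\\','|'] : List Char).isPrefixOf ('\\' :: '|' :: h1d) = true := by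
      simp [List.isPrefixOf]
    rw [ih]
    simp [nestedC, splitOn_cons_neg _ _ _ hn1, splitOn_cons_neg _ _ _ hn2,
      splitOn_pos _ _ (by decide) hbar, hs1, hs2, comb, glue]
  | case4 c rest rows cells cur h1 h2 ih =>
    have hA : ¬ (['\\','n'] : List Char).isPrefixOf (c :: rest) = true := by
      intro hp
      cases rest with
      | nil => simp [List.isPrefixOf] at hp
      | cons d r' =>
        simp [List.isPrefixOf] at hp
        exact h1 r' hp.1.symm (by rw [← hp.2])
    obtain ⟨h1d, t1, hs1⟩ := List.exists_cons_of_ne_nil (splitOn_ne_nil rest ['\\','n'] (by decide))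
    have hB : ¬ (['\\','|'] : List Char).isPrefixOf (c :: h1d) = true := by
      by_cases hc : c = '\\'
      · subst hc
        intro hp
        cases h1d with
        | nil => simp [List.isPrefixOf] at hp
        | cons e es =>
          simp [List.isPrefixOf] at hp
          cases rest with
          | nil =>
            rw [splitOn_nil'] at hs1
            simp at hs1
          | cons d r' =>
            by_cases hd2 : (['\\','n'] : List Char).isPrefixOf (d :: r') = true
            · rw [splitOn_pos _ _ (by decide) hd2] at hs1
              simp at hs1
            · rw [splitOn_cons_neg _ _ _ hd2] at hs1
              obtain ⟨p1, ps, hp1⟩ := List.exists_cons_of_ne_nil (splitOn_ne_nil r' ['\\','n'] (by decide))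
              rw [hp1] at hs1
              simp at hs1
              apply h2 r' rfl
              rw [show d = '|' by rw [hs1.1.1]; exact hp.symm]
      · intro hp
        simp [List.isPrefixOf] at hp
        exact hc hp.1.symm
    obtain ⟨g1, gs, hs2⟩ := List.exists_cons_of_ne_nil (splitOn_ne_nil h1d ['\\','|'] (by decide))
    rw [ih]
    simp [nestedC, splitOn_cons_neg _ _ _ hA, splitOn_cons_neg _ _ _ hB, hs1, hs2, comb, glue]

theorem scan_eq (label : String) :
    scanGo label.toList [] [] [] = (pySplit label "\\n").map (fun row => pySplit row "\\|") := by
  rw [scan_spec]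
  have hnl : "\\n".toList = ['\\','n'] := by decide
  have hbar : "\\|".toList = ['\\','|'] := by decide
  obtain ⟨h1d, t1, hs1⟩ := List.exists_cons_of_ne_nil (splitOn_ne_nil label.toList ['\\','n'] (by decide))
  obtain ⟨g1, gs, hs2⟩ := List.exists_cons_of_ne_nil (splitOn_ne_nil h1d ['\\','|'] (by decide))
  simp [pySplit, nestedC, hnl, hbar, hs1, hs2, comb, glue]

theorem strjoin_nil : PySem.Str.join "" [] = "" := by
  simp [PySem.Str.join, PySem.Chars.join, List.intercalate]

theorem inter_nil_cons (a : List Char) (l : List (List Char)) :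
    ([] : List Char).intercalate (a :: l) = a ++ ([] : List Char).intercalate l := by
  cases l <;> simp [List.intercalate, List.intersperse]

theorem strjoin_cons (s : String) (l : List String) :
    PySem.Str.join "" (s :: l) = s ++ PySem.Str.join "" l := by
  simp [PySem.Str.join, PySem.Chars.join, inter_nil_cons]

theorem strjoin_append (a b : List String) :
    PySem.Str.join "" (a ++ b) = PySem.Str.join "" a ++ PySem.Str.join "" b := by
  induction a with
  | nil => simp [strjoin_nil]
  | cons s t ih => simp [strjoin_cons, ih, String.append_assoc]

-- ---- loop shapes ----
theorem foldl_if_app {α β : Type} (p : α → Prop) [DecidablePred p] (F G : α → β)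
    (l : List α) (acc : List β) :
    l.foldl (fun a x => if p x then a ++ [F x] else a ++ [G x]) acc
      = acc ++ l.map (fun x => if p x then F x else G x) := by
  induction l generalizing acc with
  | nil => simp
  | cons x xs ih => simp only [List.foldl_cons, List.map_cons]; split_ifs <;> simp [ih]

-- ---- the per-row rendering of B's fragment list equals A's row strings ----
theorem perrow_join (mc : String) (rowsS : List String) :
    PySem.Str.join "" (rowsS.flatMap (fun row =>
      if 1 < (pySplit row "\\|").length then
        ["<tr>"] ++ (pySplit row "\\|").map (fun c =>
          "<td style=\"" ++ "padding: 0 16px 0 0; white-space: nowrap; vertical-align: top;" ++ "\">" ++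
            PySem.Str.replace (PySem.Str.strip c) "\\t" "&emsp;" ++ "</td>") ++ ["</tr>"]
      else
        ["<tr><td colspan=\"" ++ mc ++ "\" style=\"" ++ "padding: 0; white-space: nowrap; vertical-align: top;" ++ "\">" ++
          PySem.Str.replace ((PySem.List.pyGet? (pySplit row "\\|") 0).getD "") "\\t" "&emsp;" ++ "</td></tr>"]))
    = PySem.Str.join "" (rowsS.map (fun row =>
      if PySem.Str.isIn "\\|" row then
        "<tr>" ++ PySem.Str.join "" ((pySplit row "\\|").map (fun c =>
          "<td style=\"" ++ "padding: 0 16px 0 0; white-space: nowrap; vertical-align: top;" ++ "\">" ++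
            PySem.Str.replace (PySem.Str.strip c) "\\t" "&emsp;" ++ "</td>")) ++ "</tr>"
      else
        "<tr><td colspan=\"" ++ mc ++ "\" style=\"" ++ "padding: 0; white-space: nowrap; vertical-align: top;" ++ "\">" ++
          PySem.Str.replace row "\\t" "&emsp;" ++ "</td></tr>")) := by
  induction rowsS with
  | nil => rfl
  | cons row t ih =>
    by_cases hr : PySem.Str.isIn "\\|" row = true
    · have hlen : 1 < (pySplit row "\\|").length := by
        rw [key_isIn] at hr; simpa using hr
      simp only [List.flatMap_cons, List.map_cons, if_pos hr, if_pos hlen,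
        strjoin_append, strjoin_cons, strjoin_nil]
      rw [ih]
      simp [String.append_assoc]
    · have hlen : ¬ (1 < (pySplit row "\\|").length) := by
        rw [key_isIn] at hr; simpa using hr
      have hsingle := key_single row hr
      simp only [List.flatMap_cons, List.map_cons, if_neg hr,
        strjoin_append, strjoin_cons, hsingle]
      rw [ih]
      simp [strjoin_cons, strjoin_nil, PySem.List.pyGet?, PySem.List.pyIdx?, String.append_assoc]

-- ===== VERDICT (by name: the statement is the Claim_ definition above) =====
theorem title_to_html_py_spec : Claim_equal_title_to_html_py := by
  intro label _
  unfold Spec_title_to_html_py title_to_html_py title_to_html_py_alt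
  rw [scan_eq]
  simp only [List.any_map, List.map_map, Function.comp_def]
  have hany : ((pySplit label "\\n").any fun row => decide (1 < (pySplit row "\\|").length))
      = (pySplit label "\\n").any (fun row => PySem.Str.isIn "\\|" row) := by
    congr 1; funext row; rw [key_isIn]
  rw [hany]
  split_ifs with h
  · rfl
  · have hmax : ((pySplit label "\\n").map fun row => ((pySplit row "\\|").length : Int))
        = (pySplit label "\\n").map (fun row =>
            if PySem.Str.isIn "\\|" row then (PySem.Str.count row "\\|" : Int) + 1 else 1) := by
      apply List.map_congr_left; intro row _; rw [key_cols]
    rw [hmax, foldl_if_app]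
    have hbody : (fun (acc : List String) (r : List String) =>
        if 1 < r.length then
          (r.foldl (fun a c =>
            a ++ ["<td style=\"" ++ "padding: 0 16px 0 0; white-space: nowrap; vertical-align: top;" ++ "\">" ++
                   PySem.Str.replace (PySem.Str.strip c) "\\t" "&emsp;" ++ "</td>"])
            (acc ++ ["<tr>"])) ++ ["</tr>"]
        else
          acc ++ ["<tr><td colspan=\"" ++ PySem.Int.toStr ((PySem.List.max? ((pySplit label "\\n").map (fun row =>
              if PySem.Str.isIn "\\|" row then (PySem.Str.count row "\\|" : Int) + 1 else 1)) id).getD 1) ++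
            "\" style=\"" ++ "padding: 0; white-space: nowrap; vertical-align: top;" ++ "\">" ++
            PySem.Str.replace ((PySem.List.pyGet? r 0).getD "") "\\t" "&emsp;" ++ "</td></tr>"])
      = (fun acc r => acc ++ (if 1 < r.length then
          ["<tr>"] ++ r.map (fun c =>
            "<td style=\"" ++ "padding: 0 16px 0 0; white-space: nowrap; vertical-align: top;" ++ "\">" ++
              PySem.Str.replace (PySem.Str.strip c) "\\t" "&emsp;" ++ "</td>") ++ ["</tr>"]
        else
          ["<tr><td colspan=\"" ++ PySem.Int.toStr ((PySem.List.max? ((pySplit label "\\n").map (fun row =>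
              if PySem.Str.isIn "\\|" row then (PySem.Str.count row "\\|" : Int) + 1 else 1)) id).getD 1) ++
            "\" style=\"" ++ "padding: 0; white-space: nowrap; vertical-align: top;" ++ "\">" ++
            PySem.Str.replace ((PySem.List.pyGet? r 0).getD "") "\\t" "&emsp;" ++ "</td></tr>"])) := by
      funext acc r
      split_ifs with hlen
      · rw [PySem.List.foldl_append_singleton_eq_map]
        simp [List.append_assoc]
      · rfl
    rw [hbody, PySem.List.foldl_append_eq_flatMap]
    rw [List.flatMap_map]
    rw [strjoin_append, strjoin_append, strjoin_append, perrow_join]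
    simp [strjoin_cons, strjoin_nil, String.append_assoc]
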